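-- pv_equiv track=rewrite | github.com/Industry-Academia-SkillBridge-Research/Transcript-Based-Skill-Validation | src/job_postings_ingestion.py | extract_skills_from_job
-- ===== SOURCE A (Python) =====
-- from typing import Dict, List
--
-- def text_contains_skill(text: str, skill: str) -> bool:
--     """
--     Very simple phrase-based matching.
--     For now: check if all tokens of the skill phrase are in the text.
--     You can later replace this with spaCy / embeddings.
--     """
--     text_l = text.lower()
--     tokens = [tok for tok in skill.lower().split() if tok not in {"&", "and", "/", "-", ","}]
--
--     return all(tok in text_l for tok in tokens) if tokens else False
--
-- def extract_skills_from_job(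
--     title: str,
--     description: str,
--     skill_vocab: List[str],
-- ) -> List[str]:
--     """
--     Extract matching skills from a job posting using the skill vocabulary.
--     """
--     combined = f"{title} {description}".lower()
--
--     matched = []
--     for skill in skill_vocab:
--         if text_contains_skill(combined, skill):
--             matched.append(skill)
--
--     return matched
-- ===== SOURCE B (Python) =====
-- from typing import List
--
-- _STOP = {"&", "and", "/", "-", ","}
--
--
-- def extract_skills_from_job(
--     title: str,
--     description: str,
--     skill_vocab: List[str],
-- ) -> List[str]:
--     """Two-phase variant: tokenize every skill once, test each DISTINCT token
--     against the text once (memo dict), then select skills by dict lookups."""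
--     text = (title + " " + description).lower()
--
--     tok_lists = [
--         [t for t in skill.lower().split() if t not in _STOP]
--         for skill in skill_vocab
--     ]
--
--     present = {}
--     for toks in tok_lists:
--         for t in toks:
--             if t not in present:
--                 present[t] = t in text
--
--     return [
--         skill
--         for skill, toks in zip(skill_vocab, tok_lists)
--         if toks and all(present[t] for t in toks)
--     ]
-- ===== Notes on version B (the rewrite author's own statement) =====
-- stated objective: faster
-- what changed: B tokenizes each skill once and tests each DISTINCT token against the text exactly once via a memo dict, then selects skills by pure dict lookups, instead of A's per-skill re-tokenization and repeated substring scans of the text for every token occurrence.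
import Mathlib
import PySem

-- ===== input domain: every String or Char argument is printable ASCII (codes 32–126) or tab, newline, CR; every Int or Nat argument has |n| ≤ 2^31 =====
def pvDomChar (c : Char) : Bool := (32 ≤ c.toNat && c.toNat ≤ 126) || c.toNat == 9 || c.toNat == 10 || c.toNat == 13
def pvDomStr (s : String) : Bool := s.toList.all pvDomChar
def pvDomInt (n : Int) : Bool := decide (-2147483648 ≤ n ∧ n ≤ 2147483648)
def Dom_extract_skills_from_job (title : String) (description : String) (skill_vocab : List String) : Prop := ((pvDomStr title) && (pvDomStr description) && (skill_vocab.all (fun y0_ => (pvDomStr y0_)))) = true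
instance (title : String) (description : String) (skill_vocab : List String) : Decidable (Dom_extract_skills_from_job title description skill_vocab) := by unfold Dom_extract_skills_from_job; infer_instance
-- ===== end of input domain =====

-- B tokenizes each skill once and tests each distinct token against the text once via a
-- memo dict, then selects skills by dict lookups, instead of A's per-skill re-scan.

-- ===== PORT A =====
-- the Python set literal {"&", "and", "/", "-", ","}
def pvStopA : PySem.Set (List Char) :=
  PySem.Set.ofList ["&".toList, "and".toList, "/".toList, "-".toList, ",".toList]

def text_contains_skill (text : List Char) (skill : List Char) : Bool :=
  let text_l := PySem.Chars.lower text
  let tokens := (PySem.Chars.split₀ (PySem.Chars.lower skill)).filter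
    (fun tok => !(PySem.Set.contains pvStopA tok))
  if tokens.isEmpty then false
  else tokens.all (fun tok => PySem.Chars.isIn tok text_l)

def extract_skills_from_job (title : String) (description : String) (skill_vocab : List String) : List String :=
  -- f"{title} {description}".lower(), on code points
  let combined := PySem.Chars.lower (title.toList ++ ' ' :: description.toList)
  skill_vocab.foldl
    (fun matched skill =>
      if text_contains_skill combined skill.toList then matched ++ [skill] else matched)
    []

-- ===== PORT B =====
def pvStopB : PySem.Set (List Char) :=
  PySem.Set.ofList ["&".toList, "and".toList, "/".toList, "-".toList, ",".toList]

def pvTokens (skill : String) : List (List Char) :=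
  (PySem.Chars.split₀ (PySem.Chars.lower skill.toList)).filter
    (fun t => !(PySem.Set.contains pvStopB t))

-- 'if t not in present: present[t] = t in text'
def pvMemoStep (text : List Char) (d : PySem.Dict (List Char) Bool) (t : List Char) :
    PySem.Dict (List Char) Bool :=
  if d.contains t then d else d.insert t (PySem.Chars.isIn t text)

def extract_skills_from_job_alt (title : String) (description : String) (skill_vocab : List String) : List String :=
  let text := PySem.Chars.lower (title.toList ++ ' ' :: description.toList)
  let tokLists := skill_vocab.map pvTokens
  let present := tokLists.foldl (fun d toks => toks.foldl (pvMemoStep text) d) PySem.Dict.empty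
  (skill_vocab.zip tokLists).filterMap
    (fun p => if !p.2.isEmpty && p.2.all (fun t => present.getD t false) then some p.1 else none)

-- ===== PRECONDITION & SPEC =====
def Spec_extract_skills_from_job (title : String) (description : String) (skill_vocab : List String) (out : List String) : Prop := out = extract_skills_from_job_alt title description skill_vocab
instance (title : String) (description : String) (skill_vocab : List String) (out : List String) : Decidable (Spec_extract_skills_from_job title description skill_vocab out) := by unfold Spec_extract_skills_from_job; infer_instance

-- ===== CLAIM (what is proved, stated in full; the proofs are below) =====
def Claim_equal_extract_skills_from_job : Prop := ∀ (title : String) (description : String) (skill_vocab : List String), Dom_extract_skills_from_job title description skill_vocab → Spec_extract_skills_from_job title description skill_vocab (extract_skills_from_job title description skill_vocab)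

-- ===== LEMMAS AND PROOFS =====
theorem pvLowerChar_idem (c : Char) :
    PySem.Chars.lowerChar (PySem.Chars.lowerChar c) = PySem.Chars.lowerChar c := by
  unfold PySem.Chars.lowerChar PySem.Chars.isupper
  by_cases h : 'A' ≤ c ∧ c ≤ 'Z'
  · have h2 : c.toNat ≤ 90 := Char.le_def.mp h.2
    have hv : (c.toNat + 32).isValidChar := Or.inl (by omega)
    have ht : (Char.ofNat (c.toNat + 32)).toNat = c.toNat + 32 := by
      rw [Char.ofNat, dif_pos hv]; exact Char.toNat_ofNatAux hv
    have hA : ¬ (Char.ofNat (c.toNat + 32) ≤ 'Z') := by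
      rw [Char.le_def, UInt32.le_iff_toNat_le]
      show ¬ ((Char.ofNat (c.toNat + 32)).toNat ≤ Char.toNat 'Z')
      rw [ht]
      have h1 : 65 ≤ c.toNat := Char.le_def.mp h.1
      show ¬ (c.toNat + 32 ≤ 90); omega
    simp [h.1, h.2, hA]
  · rw [Classical.not_and_iff_not_or_not] at h
    rcases h with h | h <;> simp [h]

theorem pvLower_idem (s : List Char) :
    PySem.Chars.lower (PySem.Chars.lower s) = PySem.Chars.lower s := by
  simp [PySem.Chars.lower, List.map_map, Function.comp_def, pvLowerChar_idem]

theorem pvMemo_contains_mono (text : List Char) :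
    ∀ (ts : List (List Char)) (d : PySem.Dict (List Char) Bool) (t : List Char),
      d.contains t = true → (ts.foldl (pvMemoStep text) d).contains t = true
  | [], _, _, h => h
  | a :: ts, d, t, h => by
    simp only [List.foldl_cons]
    apply pvMemo_contains_mono text ts
    unfold pvMemoStep
    split
    · exact h
    · rw [PySem.Dict.contains_insert, h, Bool.or_true]

theorem pvMemo_contains (text : List Char) :
    ∀ (ts : List (List Char)) (d : PySem.Dict (List Char) Bool) (t : List Char),
      t ∈ ts → (ts.foldl (pvMemoStep text) d).contains t = true
  | a :: ts, d, t, h => by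
    simp only [List.foldl_cons]
    rcases List.mem_cons.mp h with rfl | h'
    · apply pvMemo_contains_mono text ts
      unfold pvMemoStep
      split
      · assumption
      · rw [PySem.Dict.contains_insert]; simp
    · exact pvMemo_contains text ts _ t h'

theorem pvMemo_getD (text : List Char) :
    ∀ (ts : List (List Char)) (d : PySem.Dict (List Char) Bool),
      (∀ t, d.contains t = true → d.getD t false = PySem.Chars.isIn t text) →
      ∀ t, (ts.foldl (pvMemoStep text) d).contains t = true →
        (ts.foldl (pvMemoStep text) d).getD t false = PySem.Chars.isIn t text
  | [], _, hd, t, ht => hd t ht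
  | a :: ts, d, hd, t, ht => by
    simp only [List.foldl_cons] at ht ⊢
    refine pvMemo_getD text ts _ ?_ t ht
    intro u hu
    unfold pvMemoStep at hu ⊢
    split at hu
    · rw [if_pos ‹_›]; exact hd u hu
    · rw [if_neg ‹_›, PySem.Dict.getD_insert]
      split
      · subst ‹u = a›; rfl
      · rw [PySem.Dict.contains_insert] at hu
        apply hd
        rcases Bool.or_eq_true_iff.mp hu with h | h
        · exact absurd (eq_of_beq h) ‹¬ u = a›
        · exact h

theorem pvTcs_eq (raw : List Char) (s : String) :
    text_contains_skill (PySem.Chars.lower raw) s.toList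
      = (!(pvTokens s).isEmpty
          && (pvTokens s).all (fun t => PySem.Chars.isIn t (PySem.Chars.lower raw))) := by
  unfold text_contains_skill pvTokens
  simp only []
  have hstop : pvStopB = pvStopA := rfl
  rw [pvLower_idem, hstop]
  split <;> simp_all

theorem pvAll_congr_mem {α : Type} (l : List α) {p q : α → Bool}
    (h : ∀ x ∈ l, p x = q x) : l.all p = l.all q := by
  induction l with
  | nil => rfl
  | cons a l ih =>
    simp only [List.all_cons, h a (List.mem_cons_self), ih (fun x hx => h x (List.mem_cons_of_mem a hx))]

theorem pvZip_filterMap (xs : List String) (g : String → List (List Char))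
    (q : List (List Char) → Bool) :
    (xs.zip (xs.map g)).filterMap (fun p => if q p.2 then some p.1 else none)
      = xs.filter (fun s => q (g s)) := by
  induction xs with
  | nil => rfl
  | cons x xs ih =>
    by_cases hq : q (g x) = true <;> simp [hq, ih]

-- ===== VERDICT (by name: the statement is the Claim_ definition above) =====
theorem extract_skills_from_job_spec : Claim_equal_extract_skills_from_job := by
  intro title description skill_vocab _
  unfold Spec_extract_skills_from_job extract_skills_from_job extract_skills_from_job_alt
  simp only []
  set raw := title.toList ++ ' ' :: description.toList with hraw
  set text := PySem.Chars.lower raw with htext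
  rw [PySem.List.foldl_append_if (fun skill => text_contains_skill text skill.toList)
        (fun s => s) skill_vocab []]
  rw [List.map_id', List.nil_append,
    pvZip_filterMap skill_vocab pvTokens
      (fun toks => !toks.isEmpty && toks.all (fun t =>
        (List.foldl (fun d toks => List.foldl (pvMemoStep text) d toks) PySem.Dict.empty
          (List.map pvTokens skill_vocab)).getD t false))]
  apply List.filter_congr
  intro s hs
  rw [pvTcs_eq raw s]
  have hall : (pvTokens s).all (fun t => PySem.Chars.isIn t text)
      = (pvTokens s).all (fun t =>
          (List.foldl (fun d toks => List.foldl (pvMemoStep text) d toks) PySem.Dict.empty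
            (List.map pvTokens skill_vocab)).getD t false) := by
    apply pvAll_congr_mem
    intro t ht
    have hflat : t ∈ ((skill_vocab.map pvTokens).flatten) :=
      List.mem_flatten.mpr ⟨pvTokens s, List.mem_map_of_mem hs, ht⟩
    rw [← List.foldl_flatten]
    exact (pvMemo_getD text ((skill_vocab.map pvTokens).flatten) PySem.Dict.empty
      (by intro u hu; simp [PySem.Dict.contains_empty] at hu)
      t (pvMemo_contains text _ _ t hflat)).symm
  rw [hall]
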